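-- pv_equiv track=rewrite | github.com/jonathonreilly/toy-physics | scripts/frontier_cubic_orbit_reynolds_projector_narrow.py | d4_orbit
-- ===== SOURCE A (Python) =====
-- def d4_orbit(dy: int, dz: int):
--     """Full D_4 orbit of (dy, dz) under axis swap + sign flip + rotation.
--
--     D_4 has 8 elements: 4 rotations {I, R90, R180, R270} composed with
--     the reflection group {I, reflection}.
--     """
--     orbit = set()
--     # 4 rotations
--     transforms = [
--         (dy, dz),       # identity
--         (-dz, dy),      # rotate 90
--         (-dy, -dz),     # rotate 180
--         (dz, -dy),      # rotate 270
--     ]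
--     for (a, b) in transforms:
--         orbit.add((a, b))
--         orbit.add((a, -b))    # plus axis-reflection
--     return frozenset(orbit)
-- ===== SOURCE B (Python) =====
-- def d4_orbit(dy: int, dz: int):
--     """D_4 orbit of (dy, dz), computed as the closure of the seed point
--     under the two group generators (axis reflection and 90-degree rotation)
--     with a depth-first worklist, instead of enumerating all 8 transforms."""
--     orbit = {(dy, dz)}
--     stack = [(dy, dz)]
--     while stack:
--         a, b = stack.pop()
--         for q in ((a, -b), (-b, a)):  # reflect, then rotate 90
--             if q not in orbit:
--                 orbit.add(q)
--                 stack.append(q)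
--     return frozenset(orbit)
-- ===== Notes on version B (the rewrite author's own statement) =====
-- stated objective: alternative
-- what changed: B computes the orbit as a worklist fixpoint closure of the seed point under the two D_4 generators (axis reflection and 90-degree rotation) instead of enumerating A's explicit list of 8 transforms.
import Mathlib
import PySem

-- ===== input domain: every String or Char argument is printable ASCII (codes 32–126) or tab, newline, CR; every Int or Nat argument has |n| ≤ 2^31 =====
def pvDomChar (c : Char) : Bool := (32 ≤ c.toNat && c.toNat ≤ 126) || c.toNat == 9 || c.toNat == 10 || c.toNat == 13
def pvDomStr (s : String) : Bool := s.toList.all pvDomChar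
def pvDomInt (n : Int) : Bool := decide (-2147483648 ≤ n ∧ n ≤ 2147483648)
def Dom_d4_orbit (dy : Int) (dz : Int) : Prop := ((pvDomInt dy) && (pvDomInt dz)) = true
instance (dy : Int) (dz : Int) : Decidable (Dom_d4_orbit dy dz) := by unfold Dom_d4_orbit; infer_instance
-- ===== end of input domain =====

-- B computes the D_4 orbit as a worklist fixpoint closure of the seed under the two
-- generators (reflection, 90-degree rotation) instead of enumerating 8 explicit transforms
-- ("alternative": structurally different, same cost).


-- ===== PORT A =====
-- for each of the 4 rotations, add the point and its axis-reflection to the set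
def d4_orbit (dy : Int) (dz : Int) : List (Int × Int) :=
  let transforms : List (Int × Int) := [(dy, dz), (-dz, dy), (-dy, -dz), (dz, -dy)]
  transforms.foldl
    (fun orbit p => PySem.Set.add (PySem.Set.add orbit (p.1, p.2)) (p.1, -p.2))
    PySem.Set.empty

-- ===== PORT B =====
-- the while-loop of Source B; the Lean list models the Python stack TOP-FIRST (head = end
-- of the Python list: '.pop()' = take the head, '.append' = cons). Fuel 9 is exact:
-- a point is pushed only when first added to the orbit, the orbit has at most 8
-- elements, so at most 1 + 8 pops ever occur and the fuel is never exhausted.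
def d4AltLoop : Nat → PySem.Set (Int × Int) → List (Int × Int) → PySem.Set (Int × Int)
  | 0, orbit, _ => orbit
  | _ + 1, orbit, [] => orbit
  | fuel + 1, orbit, (a, b) :: stack =>
    let step := fun (st : PySem.Set (Int × Int) × List (Int × Int)) (q : Int × Int) =>
      if PySem.Set.contains st.1 q then st else (PySem.Set.add st.1 q, q :: st.2)
    let st := step (step (orbit, stack) (a, -b)) (-b, a)
    d4AltLoop fuel st.1 st.2

def d4_orbit_alt (dy : Int) (dz : Int) : List (Int × Int) :=
  d4AltLoop 9 (PySem.Set.add PySem.Set.empty (dy, dz)) [(dy, dz)]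

-- ===== PRECONDITION & SPEC =====
def Spec_d4_orbit (dy : Int) (dz : Int) (out : List (Int × Int)) : Prop := out = d4_orbit_alt dy dz
instance (dy : Int) (dz : Int) (out : List (Int × Int)) : Decidable (Spec_d4_orbit dy dz out) := by unfold Spec_d4_orbit; infer_instance

-- ===== CLAIM (what is proved, stated in full; the proofs are below) =====
def Claim_equal_d4_orbit : Prop := ∀ (dy : Int) (dz : Int), Dom_d4_orbit dy dz → Spec_d4_orbit dy dz (d4_orbit dy dz)

-- ===== LEMMAS AND PROOFS =====

-- Both ports insert the 8 orbit points in the same first-occurrence order; which of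
-- them coincide depends only on dy = 0, dz = 0, dy = dz, dy = -dz, so a case split
-- on those conditions lets simp evaluate every membership test symbolically.
theorem d4_orbit_eq_alt (dy dz : Int) : d4_orbit dy dz = d4_orbit_alt dy dz := by
  by_cases hy : dy = 0 <;> by_cases hz : dz = 0
  · subst hy; subst hz; decide
  · subst hy
    have h1 : ¬ (-dz = dz) := by omega
    have h2 : ¬ (dz = -dz) := by omega
    simp [d4_orbit, d4_orbit_alt, d4AltLoop, PySem.Set.add, PySem.Set.contains,
      PySem.Set.empty, List.contains_eq_mem, Prod.ext_iff, h1, h2, hz]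
  · subst hz
    have h1 : ¬ (-dy = dy) := by omega
    have h2 : ¬ (dy = -dy) := by omega
    simp [d4_orbit, d4_orbit_alt, d4AltLoop, PySem.Set.add, PySem.Set.contains,
      PySem.Set.empty, List.contains_eq_mem, Prod.ext_iff, h1, h2, hy]
  · by_cases he : dy = dz
    · subst he
      have h1 : ¬ (-dy = dy) := by omega
      have h2 : ¬ (dy = -dy) := by omega
      simp [d4_orbit, d4_orbit_alt, d4AltLoop, PySem.Set.add, PySem.Set.contains,
        PySem.Set.empty, List.contains_eq_mem, Prod.ext_iff, h1, h2]
    · by_cases hn : dy = -dz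
      · subst hn
        have h1 : ¬ (-dz = dz) := by omega
        have h2 : ¬ (dz = -dz) := by omega
        simp [d4_orbit, d4_orbit_alt, d4AltLoop, PySem.Set.add, PySem.Set.contains,
          PySem.Set.empty, List.contains_eq_mem, Prod.ext_iff, h1, h2, neg_neg]
      · have h1 : ¬ (-dz = dz) := by omega
        have h2 : ¬ (dz = -dz) := by omega
        have h3 : ¬ (-dy = dy) := by omega
        have h4 : ¬ (dy = -dy) := by omega
        have h5 : ¬ (dz = dy) := by omega
        have h6 : ¬ (-dz = dy) := by omega
        have h7 : ¬ (-dy = dz) := by omega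
        have h8 : ¬ (dz = -dy) := by omega
        have h9 : ¬ (-dy = -dz) := by omega
        have h10 : ¬ (-dz = -dy) := by omega
        simp [d4_orbit, d4_orbit_alt, d4AltLoop, PySem.Set.add, PySem.Set.contains,
          PySem.Set.empty, List.contains_eq_mem, Prod.ext_iff,
          h1, h2, h3, h4, h5, h6, h7, h8, h9, h10, he, hn]

-- ===== VERDICT (by name: the statement is the Claim_ definition above) =====
theorem d4_orbit_spec : Claim_equal_d4_orbit := by
  intro dy dz _
  unfold Spec_d4_orbit
  exact d4_orbit_eq_alt dy dz
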